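-- pv_equiv track=rewrite | github.com/scauglog/brain_record_toolbox | signal_processing.py | find_full_step_time
-- ===== SOURCE A (Python) =====
-- def find_full_step_time(stance_steps_time, swing_steps_time):
--     full_step=[]
--     for step_stance in stance_steps_time:
--         for step_swing in swing_steps_time:
--             if step_stance[1] == step_swing[0] and step_swing[0]-step_stance[0] < 1:
--                 full_step.append([step_stance[0], step_stance[1], step_swing[1]])
--                 break
--     return full_step
-- ===== SOURCE B (Python) =====
-- def find_full_step_time(stance_steps_time, swing_steps_time):
--     # Sort-merge join: sort stances by end time (keeping original positions) and
--     # swings by start time (stable, so the first swing per start time stays first),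
--     # sweep one pointer across the swings, then emit results in original stance order.
--     stances = sorted(enumerate(stance_steps_time), key=lambda p: p[1][1])
--     swings = sorted(swing_steps_time, key=lambda w: w[0])
--     result = [None] * len(stance_steps_time)
--     j = 0
--     for i, st in stances:
--         while j < len(swings) and swings[j][0] < st[1]:
--             j += 1
--         if j < len(swings) and swings[j][0] == st[1] and st[1] - st[0] < 1:
--             result[i] = [st[0], st[1], swings[j][1]]
--     return [r for r in result if r is not None]
-- ===== Notes on version B (the rewrite author's own statement) =====
-- stated objective: alternative
-- what changed: Replaces A's nested scan with a sort-merge join: stances sorted by end time and swings stably sorted by start time are swept with one advancing pointer, and matches are re-emitted in original stance order via an index-addressed result array.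
-- outside the precondition, e.g. on find_full_step_time([[7]], []): A returns [], B raises IndexError; on find_full_step_time([], [[]]): A returns [], B raises IndexError
import Mathlib
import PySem

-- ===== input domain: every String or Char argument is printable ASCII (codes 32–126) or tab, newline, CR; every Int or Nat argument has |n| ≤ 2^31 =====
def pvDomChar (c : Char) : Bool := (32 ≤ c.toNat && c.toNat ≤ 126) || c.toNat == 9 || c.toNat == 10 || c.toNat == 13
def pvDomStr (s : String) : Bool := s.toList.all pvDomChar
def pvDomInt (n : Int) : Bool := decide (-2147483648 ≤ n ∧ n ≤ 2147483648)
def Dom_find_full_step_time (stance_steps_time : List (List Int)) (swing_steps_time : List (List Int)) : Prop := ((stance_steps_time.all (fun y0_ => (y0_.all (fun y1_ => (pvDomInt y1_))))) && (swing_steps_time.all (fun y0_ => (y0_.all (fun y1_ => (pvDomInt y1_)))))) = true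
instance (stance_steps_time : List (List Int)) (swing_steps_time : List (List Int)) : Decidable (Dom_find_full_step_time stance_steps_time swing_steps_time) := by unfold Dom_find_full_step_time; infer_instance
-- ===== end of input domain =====

-- B replaces A's nested scan by a sort-merge join: stances sorted by end time and swings stably
-- sorted by start time are swept with one pointer, results re-emitted in original stance order.


-- ===== PORT A =====
-- inner 'for step_swing in swing_steps_time: … break' (first match, or nothing)
def findSwingA (step_stance : List Int) : List (List Int) → Option (List Int)
  | [] => none
  | step_swing :: rest =>
    if PySem.List.pyGetD step_stance 1 0 = PySem.List.pyGetD step_swing 0 0 ∧ PySem.List.pyGetD step_swing 0 0 - PySem.List.pyGetD step_stance 0 0 < 1 then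
      some [PySem.List.pyGetD step_stance 0 0, PySem.List.pyGetD step_stance 1 0, PySem.List.pyGetD step_swing 1 0]
    else findSwingA step_stance rest

def find_full_step_time (stance_steps_time : List (List Int)) (swing_steps_time : List (List Int)) : List (List Int) :=
  stance_steps_time.foldl (fun full_step step_stance =>
    match findSwingA step_stance swing_steps_time with
    | some triple => full_step ++ [triple]
    | none => full_step) []

-- ===== PORT B =====
-- Source B's 'while j < len(swings) and swings[j][0] < st[1]: j += 1'
def advanceJ (swings : List (List Int)) (k : Int) (j : Nat) : Nat :=
  if h : j < swings.length ∧ PySem.List.pyGetD (swings.getD j []) 0 0 < k then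
    advanceJ swings k (j + 1)
  else j
termination_by swings.length - j
decreasing_by omega

-- Source B's main 'for i, st in stances' loop over the sorted stances, writing into result
def mergeLoop (swings : List (List Int)) : List (Int × List Int) → Nat → List (Option (List Int)) → List (Option (List Int))
  | [], _, res => res
  | (i, s) :: rest, j, res =>
    let j' := advanceJ swings (PySem.List.pyGetD s 1 0) j
    let res' :=
      if j' < swings.length ∧ PySem.List.pyGetD (swings.getD j' []) 0 0 = PySem.List.pyGetD s 1 0 ∧
          PySem.List.pyGetD s 1 0 - PySem.List.pyGetD s 0 0 < 1 then
        res.set i.toNat (some [PySem.List.pyGetD s 0 0, PySem.List.pyGetD s 1 0, PySem.List.pyGetD (swings.getD j' []) 1 0])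
      else res
    mergeLoop swings rest j' res'

def find_full_step_time_alt (stance_steps_time : List (List Int)) (swing_steps_time : List (List Int)) : List (List Int) :=
  let stances := PySem.List.sorted (PySem.List.enumerate stance_steps_time) (fun p => PySem.List.pyGetD p.2 1 0)
  let swings := PySem.List.sorted swing_steps_time (fun w => PySem.List.pyGetD w 0 0)
  (mergeLoop swings stances 0 (List.replicate stance_steps_time.length none)).filterMap id

-- ===== PRECONDITION & SPEC =====
-- Pre_ excludes inputs with an inner list of length < 2: there Python A raises IndexError, or —
-- when every short list happens never to be indexed — returns [] while B's sort keys raise.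
def Pre_find_full_step_time (stance_steps_time : List (List Int)) (swing_steps_time : List (List Int)) : Prop :=
  (∀ s ∈ stance_steps_time, 2 ≤ s.length) ∧ (∀ w ∈ swing_steps_time, 2 ≤ w.length)
instance (stance_steps_time : List (List Int)) (swing_steps_time : List (List Int)) : Decidable (Pre_find_full_step_time stance_steps_time swing_steps_time) := by unfold Pre_find_full_step_time; infer_instance

def pvWitness_find_full_step_time : List (List Int) × List (List Int) := ([[0, 1], [3, 9]], [[1, 4], [1, 7]])

def Spec_find_full_step_time (stance_steps_time : List (List Int)) (swing_steps_time : List (List Int)) (out : List (List Int)) : Prop := out = find_full_step_time_alt stance_steps_time swing_steps_time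
instance (stance_steps_time : List (List Int)) (swing_steps_time : List (List Int)) (out : List (List Int)) : Decidable (Spec_find_full_step_time stance_steps_time swing_steps_time out) := by unfold Spec_find_full_step_time; infer_instance

-- ===== CLAIM (what is proved, stated in full; the proofs are below) =====
def Claim_equal_find_full_step_time : Prop := ∀ (stance_steps_time : List (List Int)) (swing_steps_time : List (List Int)), Dom_find_full_step_time stance_steps_time swing_steps_time → Pre_find_full_step_time stance_steps_time swing_steps_time → Spec_find_full_step_time stance_steps_time swing_steps_time (find_full_step_time stance_steps_time swing_steps_time)

-- ===== LEMMAS AND PROOFS =====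

-- A's inner loop as first match on swing start (the <1 test depends only on the stance)
theorem findSwingA_eq (s : List Int) (sw : List (List Int)) :
    findSwingA s sw
    = if PySem.List.pyGetD s 1 0 - PySem.List.pyGetD s 0 0 < 1 then
        (sw.find? (fun w => PySem.List.pyGetD w 0 0 == PySem.List.pyGetD s 1 0)).map
          (fun w => [PySem.List.pyGetD s 0 0, PySem.List.pyGetD s 1 0, PySem.List.pyGetD w 1 0])
      else none := by
  induction sw with
  | nil => simp [findSwingA]
  | cons w rest ih =>
    simp only [findSwingA, List.find?]
    by_cases he : PySem.List.pyGetD s 1 0 = PySem.List.pyGetD w 0 0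
    · by_cases hlt : PySem.List.pyGetD s 1 0 - PySem.List.pyGetD s 0 0 < 1
      · rw [if_pos ⟨he, by omega⟩]
        have : (PySem.List.pyGetD w 0 0 == PySem.List.pyGetD s 1 0) = true := by simp [he]
        simp [this, hlt]
      · rw [if_neg (by omega), ih]
        have : (PySem.List.pyGetD w 0 0 == PySem.List.pyGetD s 1 0) = true := by simp [he]
        by_cases hlt2 : PySem.List.pyGetD s 1 0 - PySem.List.pyGetD s 0 0 < 1
        · omega
        · simp [hlt2]
    · rw [if_neg (by intro h; exact he h.1), ih]
      have : (PySem.List.pyGetD w 0 0 == PySem.List.pyGetD s 1 0) = false := by simp [Ne.symm he]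
      rw [this]

-- A as a filterMap over the stance list
theorem foldl_append_option (f : List Int → Option (List Int)) :
    ∀ (l : List (List Int)) (acc : List (List Int)),
      l.foldl (fun a s => match f s with | some t => a ++ [t] | none => a) acc = acc ++ l.filterMap f := by
  intro l
  induction l with
  | nil => simp
  | cons x t ih =>
    intro acc
    simp only [List.foldl_cons, List.filterMap_cons]
    cases h : f x with
    | none => simp [ih]
    | some v => simp [ih]

-- find? as head of filter (no such lemma in Mathlib/PySem)
theorem find?_eq_head?_filter (p : List Int → Bool) :
    ∀ (l : List (List Int)), l.find? p = (l.filter p).head? := by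
  intro l
  induction l with
  | nil => simp
  | cons x t ih =>
    by_cases hx : p x = true
    · rw [List.find?_cons_of_pos hx, List.filter_cons_of_pos hx]
      simp
    · have hx' : p x = false := by simpa using hx
      rw [List.find?_cons_of_neg (by simp [hx']), List.filter_cons_of_neg (by simp [hx']), ih]

-- stability of PySem.List.sorted for an equality-on-key filter: one insertBy step
theorem filter_insertBy (key : List Int → Int) (k : Int) (x : List Int) :
    ∀ (ys : List (List Int)), ys.Pairwise (fun a b => key a ≤ key b) →
      (PySem.List.insertBy (fun a b => decide (key a < key b)) x ys).filter (fun z => key z == k)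
      = ys.filter (fun z => key z == k) ++ (if key x == k then [x] else []) := by
  intro ys
  induction ys with
  | nil =>
    intro _
    have h0 : PySem.List.insertBy (fun a b => decide (key a < key b)) x [] = [x] := rfl
    rw [h0]
    by_cases hx : key x = k
    · have hb : (key x == k) = true := by simp [hx]
      simp [List.filter, hb]
    · have hb : (key x == k) = false := by simp [hx]
      simp [List.filter, hb]
  | cons y t ih =>
    intro hpw
    have hpy := (List.pairwise_cons.mp hpw).1
    have hpt := (List.pairwise_cons.mp hpw).2
    by_cases hlt : key x < key y
    · have : PySem.List.insertBy (fun a b => decide (key a < key b)) x (y :: t) = x :: y :: t := by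
        simp [PySem.List.insertBy, hlt]
      rw [this]
      by_cases hx : key x = k
      · have hyt : (y :: t).filter (fun z => key z == k) = [] := by
          apply List.filter_eq_nil_iff.mpr
          intro z hz
          have hzy : key y ≤ key z ∨ z = y := by
            rcases List.mem_cons.mp hz with h | h
            · right; exact h
            · left; exact hpy z h
          simp only [beq_iff_eq]
          rcases hzy with h | h
          · omega
          · subst h; omega
        rw [hyt]
        simp [hx, hyt]
      · have hxb : (key x == k) = false := by simp [hx]
        simp [List.filter_cons, hxb]
    · have : PySem.List.insertBy (fun a b => decide (key a < key b)) x (y :: t) =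
          y :: PySem.List.insertBy (fun a b => decide (key a < key b)) x t := by
        simp [PySem.List.insertBy, hlt]
      rw [this, List.filter_cons, List.filter_cons, ih hpt]
      by_cases hy : (key y == k) = true <;> simp [hy]

-- stability: sorting by key preserves the subsequence of elements with any fixed key value
theorem filter_sorted_key (key : List Int → Int) (k : Int) (xs : List (List Int)) :
    (PySem.List.sorted xs key).filter (fun z => key z == k) = xs.filter (fun z => key z == k) := by
  induction xs using List.reverseRecOn with
  | nil => rw [PySem.List.sorted_eq_foldl_insertBy]; simp
  | append_singleton xs x ih =>
    rw [PySem.List.sorted_eq_foldl_insertBy, List.foldl_append, ← PySem.List.sorted_eq_foldl_insertBy]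
    simp only [List.foldl_cons, List.foldl_nil]
    rw [filter_insertBy key k x _ (PySem.List.sorted_pairwise xs key), ih, List.filter_append]
    congr 1
    by_cases hx : (key x == k) = true <;> simp [List.filter, hx]

theorem find?_sorted_key (key : List Int → Int) (k : Int) (xs : List (List Int)) :
    (PySem.List.sorted xs key).find? (fun z => key z == k) = xs.find? (fun z => key z == k) := by
  rw [find?_eq_head?_filter, find?_eq_head?_filter, filter_sorted_key]

-- the while loop: its result still bounds-below, and stops at the first start ≥ k
theorem advanceJ_spec (swings : List (List Int)) (k : Int) :
    ∀ j, (∀ t, t < j → t < swings.length → PySem.List.pyGetD (swings.getD t []) 0 0 < k) →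
      (∀ t, t < advanceJ swings k j → t < swings.length → PySem.List.pyGetD (swings.getD t []) 0 0 < k) ∧
      (advanceJ swings k j < swings.length → k ≤ PySem.List.pyGetD (swings.getD (advanceJ swings k j) []) 0 0) ∧
      j ≤ advanceJ swings k j := by
  intro j
  induction j using advanceJ.induct swings k with
  | case1 j h ih =>
    intro hlo
    rw [advanceJ, dif_pos h]
    have step : ∀ t, t < j + 1 → t < swings.length → PySem.List.pyGetD (swings.getD t []) 0 0 < k := by
      intro t ht htl
      rcases Nat.lt_or_ge t j with h1 | h1
      · exact hlo t h1 htl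
      · have : t = j := by omega
        subst this; exact h.2
    obtain ⟨a, b, c⟩ := ih step
    exact ⟨a, b, by omega⟩
  | case2 j h =>
    intro hlo
    rw [advanceJ, dif_neg h]
    refine ⟨hlo, ?_, le_refl j⟩
    intro hj
    by_contra hk
    exact h ⟨hj, by omega⟩

-- pointer lookup = find? on the sorted swing list
theorem find?_of_ptr (swings : List (List Int)) (k : Int)
    (hs : swings.Pairwise (fun a b => PySem.List.pyGetD a 0 0 ≤ PySem.List.pyGetD b 0 0)) :
    ∀ j', (∀ t, t < j' → t < swings.length → PySem.List.pyGetD (swings.getD t []) 0 0 < k) →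
      (j' < swings.length → k ≤ PySem.List.pyGetD (swings.getD j' []) 0 0) →
      swings.find? (fun w => PySem.List.pyGetD w 0 0 == k)
      = if j' < swings.length ∧ PySem.List.pyGetD (swings.getD j' []) 0 0 = k then some (swings.getD j' []) else none := by
  induction swings with
  | nil => intro j' _ _; simp
  | cons w rest ih =>
    intro j' hlo hhi
    have hpw := (List.pairwise_cons.mp hs).1
    have hrest := (List.pairwise_cons.mp hs).2
    cases j' with
    | zero =>
      by_cases hw : PySem.List.pyGetD w 0 0 = k
      · have : (PySem.List.pyGetD w 0 0 == k) = true := by simp [hw]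
        simp [List.find?, hw]
      · have hk : k ≤ PySem.List.pyGetD w 0 0 := by
          simpa using hhi (by simp)
        have hklt : k < PySem.List.pyGetD w 0 0 := lt_of_le_of_ne hk (fun h => hw h.symm)
        have hb : (PySem.List.pyGetD w 0 0 == k) = false := by simp [hw]
        have hnone : rest.find? (fun x => PySem.List.pyGetD x 0 0 == k) = none := by
          apply List.find?_eq_none.mpr
          intro x hx
          have := hpw x hx
          simp only [beq_iff_eq]
          omega
        simp [List.find?, hb, hnone, hw]
    | succ t =>
      have hw : PySem.List.pyGetD w 0 0 < k := by
        simpa using hlo 0 (by omega) (by simp)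
      have hb : (PySem.List.pyGetD w 0 0 == k) = false := by
        simp only [beq_eq_false_iff_ne]; omega
      have hlo' : ∀ u, u < t → u < rest.length → PySem.List.pyGetD (rest.getD u []) 0 0 < k := by
        intro u hu hul
        simpa using hlo (u + 1) (by omega) (by simp; omega)
      have hhi' : t < rest.length → k ≤ PySem.List.pyGetD (rest.getD t []) 0 0 := by
        intro htl
        simpa using hhi (by simp; omega)
      have := ih hrest t hlo' hhi'
      simp only [List.find?, hb] at *
      rw [this]
      by_cases hc : t < rest.length ∧ PySem.List.pyGetD (rest.getD t []) 0 0 = k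
      · rw [if_pos hc, if_pos (show (t + 1) < (w :: rest).length ∧ PySem.List.pyGetD ((w :: rest).getD (t + 1) []) 0 0 = k from ⟨by simp; omega, by simpa using hc.2⟩)]
        simp
      · rw [if_neg hc, if_neg ?_]
        intro hc2
        apply hc
        refine ⟨by have := hc2.1; simp at this; omega, by simpa using hc2.2⟩

-- the merge loop, rewritten as a fold that writes findSwingA's answer at each stance's slot
theorem mergeLoop_eq_foldl (swings : List (List Int))
    (hs : swings.Pairwise (fun a b => PySem.List.pyGetD a 0 0 ≤ PySem.List.pyGetD b 0 0)) :
    ∀ (l : List (Int × List Int)) (j : Nat) (res : List (Option (List Int))),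
      l.Pairwise (fun p q => PySem.List.pyGetD p.2 1 0 ≤ PySem.List.pyGetD q.2 1 0) →
      (∀ t, t < j → t < swings.length → ∀ p ∈ l, PySem.List.pyGetD (swings.getD t []) 0 0 < PySem.List.pyGetD p.2 1 0) →
      mergeLoop swings l j res
      = l.foldl (fun r p => match findSwingA p.2 swings with | some t => r.set p.1.toNat (some t) | none => r) res := by
  intro l
  induction l with
  | nil => intro j res _ _; rfl
  | cons p rest ih =>
    intro j res hpl hinv
    obtain ⟨i, s⟩ := p
    have hk := (List.pairwise_cons.mp hpl).1
    have hpl' := (List.pairwise_cons.mp hpl).2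
    have hinv0 : ∀ t, t < j → t < swings.length → PySem.List.pyGetD (swings.getD t []) 0 0 < PySem.List.pyGetD s 1 0 := by
      intro t ht htl
      exact hinv t ht htl (i, s) List.mem_cons_self
    obtain ⟨hlo', hhi', _⟩ := advanceJ_spec swings (PySem.List.pyGetD s 1 0) j hinv0
    have hfind := find?_of_ptr swings (PySem.List.pyGetD s 1 0) hs
      (advanceJ swings (PySem.List.pyGetD s 1 0) j) hlo' hhi'
    show mergeLoop swings ((i, s) :: rest) j res = _
    rw [mergeLoop]
    simp only [List.foldl_cons]
    have hinv' : ∀ t, t < advanceJ swings (PySem.List.pyGetD s 1 0) j → t < swings.length →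
        ∀ q ∈ rest, PySem.List.pyGetD (swings.getD t []) 0 0 < PySem.List.pyGetD q.2 1 0 := by
      intro t ht htl q hq
      exact lt_of_lt_of_le (hlo' t ht htl) (hk q hq)
    rw [ih (advanceJ swings (PySem.List.pyGetD s 1 0) j) _ hpl' hinv']
    congr 1
    rw [findSwingA_eq s swings, hfind]
    by_cases hlt : PySem.List.pyGetD s 1 0 - PySem.List.pyGetD s 0 0 < 1
    · by_cases hc : advanceJ swings (PySem.List.pyGetD s 1 0) j < swings.length ∧
          PySem.List.pyGetD (swings.getD (advanceJ swings (PySem.List.pyGetD s 1 0) j) []) 0 0 = PySem.List.pyGetD s 1 0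
      · rw [if_pos ⟨hc.1, hc.2, hlt⟩, if_pos hlt, if_pos hc]
        simp
      · rw [if_neg (fun h => hc ⟨h.1, h.2.1⟩), if_pos hlt, if_neg hc]
        simp
    · rw [if_neg (fun h => hlt h.2.2), if_neg hlt]

-- writing each slot once: untouched slots keep their value …
theorem foldl_set_not_mem (f : List Int → Option (List Int)) :
    ∀ (l : List (Int × List Int)) (res : List (Option (List Int))) (idx : Nat),
      (∀ p ∈ l, p.1.toNat ≠ idx) →
      (l.foldl (fun r p => match f p.2 with | some t => r.set p.1.toNat (some t) | none => r) res)[idx]? = res[idx]? := by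
  intro l
  induction l with
  | nil => simp
  | cons p t ih =>
    intro res idx hne
    simp only [List.foldl_cons]
    cases h : f p.2 with
    | none => exact ih res idx (fun q hq => hne q (List.mem_cons_of_mem _ hq))
    | some v =>
      rw [ih _ idx (fun q hq => hne q (List.mem_cons_of_mem _ hq))]
      exact List.getElem?_set_ne (hne p (List.mem_cons_self))

theorem foldl_set_length (f : List Int → Option (List Int)) :
    ∀ (l : List (Int × List Int)) (res : List (Option (List Int))),
      (l.foldl (fun r p => match f p.2 with | some t => r.set p.1.toNat (some t) | none => r) res).length = res.length := by
  intro l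
  induction l with
  | nil => simp
  | cons p t ih =>
    intro res
    simp only [List.foldl_cons]
    cases h : f p.2 with
    | none => exact ih res
    | some v => rw [ih]; simp

-- … and each slot named by l receives f of its stance
theorem foldl_set_mem (st : List (List Int)) (f : List Int → Option (List Int)) :
    ∀ (l : List (Int × List Int)) (res : List (Option (List Int))),
      (∀ p ∈ l, ∃ (kk : Nat) (hk : kk < st.length), p = ((kk : Int), st[kk])) →
      (l.map (·.1)).Nodup →
      res.length = st.length →
      (∀ i (h : i < st.length), res[i]? = some none ∨ res[i]? = some (f st[i])) →
      ∀ idx (hidx : idx < st.length), (idx : Int) ∈ l.map (·.1) →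
        (l.foldl (fun r p => match f p.2 with | some t => r.set p.1.toNat (some t) | none => r) res)[idx]? = some (f st[idx]) := by
  intro l
  induction l with
  | nil =>
    intro res _ _ _ _ idx _ hmem
    simp at hmem
  | cons p t ih =>
    intro res hel hnd hlen hres idx hidx hmem
    obtain ⟨kk, hk, hpe⟩ := hel p List.mem_cons_self
    have hnd0 : (p.1 :: t.map (·.1)).Nodup := by simpa using hnd
    have hnd1 : (kk : Int) ∉ t.map (·.1) := by
      rw [hpe] at hnd0
      exact (List.nodup_cons.mp hnd0).1
    have hnd2 : (t.map (·.1)).Nodup := (List.nodup_cons.mp hnd0).2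
    simp only [List.foldl_cons]
    by_cases heq : kk = idx
    · subst heq
      have hnot : ∀ q ∈ t, q.1.toNat ≠ kk := by
        intro q hq hcon
        obtain ⟨mm, hm, hqe⟩ := hel q (List.mem_cons_of_mem _ hq)
        apply hnd1
        have hmm : mm = kk := by
          rw [hqe] at hcon
          simpa using hcon
        have hq1 : q.1 = (kk : Int) := by simp [hqe, hmm]
        rw [← hq1]
        exact List.mem_map_of_mem hq
      rw [hpe]
      cases hf : f st[kk] with
      | some v =>
        simp only [Int.toNat_natCast]
        rw [foldl_set_not_mem f t _ kk hnot]
        have hkl : kk < res.length := by omega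
        rw [List.getElem?_set_self hkl]
      | none =>
        rw [foldl_set_not_mem f t res kk hnot]
        rcases hres kk hk with h | h
        · exact h
        · rw [hf] at h
          exact h
    · have hmem' : (idx : Int) ∈ t.map (·.1) := by
        rcases List.mem_map.mp hmem with ⟨q, hq, hq1⟩
        rcases List.mem_cons.mp hq with h | h
        · exfalso
          apply heq
          rw [h, hpe] at hq1
          have : ((kk : Int)) = (idx : Int) := by simpa using hq1
          exact_mod_cast this
        · exact List.mem_map.mpr ⟨q, h, hq1⟩
      have hres' : ∀ i (h : i < st.length),
          (match f p.2 with | some v => res.set p.1.toNat (some v) | none => res)[i]? = some none ∨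
          (match f p.2 with | some v => res.set p.1.toNat (some v) | none => res)[i]? = some (f st[i]) := by
        intro i hi
        cases hf : f p.2 with
        | none => exact hres i hi
        | some v =>
          have hps : p.1.toNat = kk := by rw [hpe]; simp
          have hred : (match (some v : Option (List Int)) with
              | some w => res.set p.1.toNat (some w) | none => res) = res.set p.1.toNat (some v) := rfl
          rw [hred, hps]
          by_cases hik : i = kk
          · subst hik
            right
            rw [List.getElem?_set_self (by omega : i < res.length)]
            have hfk : f st[i] = some v := by
              rw [hpe] at hf
              simpa using hf
            rw [hfk]
          · rw [List.getElem?_set_ne (fun h => hik h.symm)]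
            exact hres i hi
      have hlen' : (match f p.2 with | some v => res.set p.1.toNat (some v) | none => res).length = st.length := by
        cases hf : f p.2 <;> simp [hlen]
      exact ih _ (fun q hq => hel q (List.mem_cons_of_mem _ hq)) hnd2 hlen' hres' idx hidx hmem'

-- sorting the swings by start time does not change A's first-match lookup (stability)
theorem findSwingA_sorted (s : List Int) (sw : List (List Int)) :
    findSwingA s (PySem.List.sorted sw (fun w => PySem.List.pyGetD w 0 0)) = findSwingA s sw := by
  rw [findSwingA_eq, findSwingA_eq, find?_sorted_key (fun w => PySem.List.pyGetD w 0 0)]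

-- the merge phase produces exactly the per-stance answers, in original stance order
theorem merge_result (st sw : List (List Int)) :
    mergeLoop (PySem.List.sorted sw (fun w => PySem.List.pyGetD w 0 0))
      (PySem.List.sorted (PySem.List.enumerate st) (fun p => PySem.List.pyGetD p.2 1 0)) 0
      (List.replicate st.length none)
    = st.map (fun s => findSwingA s sw) := by
  have hsw := PySem.List.sorted_pairwise sw (fun w => PySem.List.pyGetD w 0 0)
  have hst := PySem.List.sorted_pairwise (PySem.List.enumerate st) (fun p => PySem.List.pyGetD p.2 1 0)
  rw [mergeLoop_eq_foldl _ hsw _ 0 _ hst (by intro t ht; exact absurd ht (Nat.not_lt_zero t))]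
  simp only [findSwingA_sorted]
  have hperm : (PySem.List.sorted (PySem.List.enumerate st) (fun p => PySem.List.pyGetD p.2 1 0)).Perm
      (PySem.List.enumerate st) := PySem.List.sorted_perm _ _ _
  have hel : ∀ p ∈ PySem.List.sorted (PySem.List.enumerate st) (fun p => PySem.List.pyGetD p.2 1 0),
      ∃ (kk : Nat) (hk : kk < st.length), p = ((kk : Int), st[kk]) := by
    intro p hp
    have hp' := hperm.mem_iff.mp hp
    obtain ⟨k, hk, hpe⟩ := (PySem.List.mem_enumerate_iff _ _ _).mp hp'
    exact ⟨k, hk, by simpa using hpe⟩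
  have hmapperm : ((PySem.List.sorted (PySem.List.enumerate st) (fun p => PySem.List.pyGetD p.2 1 0)).map (·.1)).Perm
      ((PySem.List.enumerate st).map (·.1)) := hperm.map _
  have hnd : ((PySem.List.sorted (PySem.List.enumerate st) (fun p => PySem.List.pyGetD p.2 1 0)).map (·.1)).Nodup := by
    rw [hmapperm.nodup_iff]
    rw [PySem.List.map_fst_enumerate]
    exact PySem.List.nodup_pyRange_one _ _
  apply List.ext_getElem?
  intro idx
  by_cases hidx : idx < st.length
  · have hcov : (idx : Int) ∈ (PySem.List.sorted (PySem.List.enumerate st) (fun p => PySem.List.pyGetD p.2 1 0)).map (·.1) := by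
      rw [hmapperm.mem_iff, PySem.List.map_fst_enumerate]
      rw [PySem.List.mem_pyRange_one]
      constructor
      · exact_mod_cast Nat.zero_le idx
      · simpa using (by exact_mod_cast hidx : (idx : Int) < (st.length : Int))
    rw [foldl_set_mem st (fun s => findSwingA s sw) _ _ hel hnd (by simp) ?hres idx hidx hcov]
    case hres =>
      intro i hi
      left
      simp [hi]
    rw [List.getElem?_map]
    rw [List.getElem?_eq_getElem hidx]
    simp
  · have hlen : (List.foldl (fun r p => match findSwingA p.2 sw with | some t => r.set p.1.toNat (some t) | none => r)
        (List.replicate st.length none)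
        (PySem.List.sorted (PySem.List.enumerate st) (fun p => PySem.List.pyGetD p.2 1 0))).length = st.length := by
      rw [foldl_set_length (fun s => findSwingA s sw)]
      simp
    rw [List.getElem?_eq_none (by omega), List.getElem?_eq_none (by simpa using (by omega : st.length ≤ idx))]

-- ===== VERDICT (by name: the statement is the Claim_ definition above) =====
theorem find_full_step_time_spec : Claim_equal_find_full_step_time := by
  intro st sw _ _
  unfold Spec_find_full_step_time find_full_step_time find_full_step_time_alt
  rw [foldl_append_option]
  show [] ++ List.filterMap (fun s => findSwingA s sw) st
      = List.filterMap id (mergeLoop (PySem.List.sorted sw (fun w => PySem.List.pyGetD w 0 0))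
          (PySem.List.sorted (PySem.List.enumerate st) (fun p => PySem.List.pyGetD p.2 1 0)) 0
          (List.replicate st.length none))
  rw [merge_result, List.filterMap_map]
  simp
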